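-- pv_equiv track=rewrite | github.com/rabinkmc/dsa | 3722-lexicographically-smallest-string-after-reverse.py | lexSmallest
-- ===== SOURCE A (Python) =====
-- def lexSmallest(s: str) -> str:
--     n = len(s)
--     ans = min(s, s[::-1])
--
--     for i in range(2, n):
--         front = s[:i][::-1] + s[i:]
--         ans = min(ans, front)
--         back = s[: n - i] + s[n - i :][::-1]
--         ans = min(ans, back)
--
--     return ans
-- ===== SOURCE B (Python) =====
-- def lexSmallest(s: str) -> str:
--     # Virtual-candidate tournament: each candidate (reverse of the length-k prefix,
--     # or of the suffix starting at j) is kept only as a descriptor (kind, pivot);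
--     # every candidate is two contiguous runs of s or of r = s[::-1], so two
--     # candidates are compared by a first-difference test over at most three
--     # boundary-aligned segments, and only the final winner is materialized.
--     n = len(s)
--     if n == 0:
--         return s
--     r = s[::-1]
--
--     def seg(c, lo, hi):  # candidate characters [lo:hi); [lo, hi) never crosses the pivot
--         kind, k = c
--         if kind == 0:  # reverse of s[:k], then s[k:]
--             return r[n - k + lo:n - k + hi] if hi <= k else s[lo:hi]
--         else:  # s[:k], then reverse of s[k:]
--             return s[lo:hi] if hi <= k else r[lo - k:hi - k]
--
--     def less(a, b):
--         m = min(a[1], b[1])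
--         M = max(a[1], b[1])
--         for lo, hi in ((0, m), (m, M), (M, n)):
--             x = seg(a, lo, hi)
--             y = seg(b, lo, hi)
--             if x != y:
--                 return x < y
--         return False
--
--     best = (0, 1)
--     for k in range(2, n + 1):
--         c = (0, k)
--         if less(c, best):
--             best = c
--     for j in range(1, n):
--         c = (1, j)
--         if less(c, best):
--             best = c
--     return seg(best, 0, best[1]) + seg(best, best[1], n)
-- ===== Notes on version B (the rewrite author's own statement) =====
-- stated objective: faster
-- what changed: A materializes every prefix/suffix-reversal candidate as a full new string and takes min over those strings; B never builds a candidate: each candidate is a descriptor (kind, pivot), two candidates are compared by a first-difference test over at most three boundary-aligned contiguous segments of s and of reversed s, the tournament keeps only the best descriptor, and only the final winner is materialized.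
import Mathlib
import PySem

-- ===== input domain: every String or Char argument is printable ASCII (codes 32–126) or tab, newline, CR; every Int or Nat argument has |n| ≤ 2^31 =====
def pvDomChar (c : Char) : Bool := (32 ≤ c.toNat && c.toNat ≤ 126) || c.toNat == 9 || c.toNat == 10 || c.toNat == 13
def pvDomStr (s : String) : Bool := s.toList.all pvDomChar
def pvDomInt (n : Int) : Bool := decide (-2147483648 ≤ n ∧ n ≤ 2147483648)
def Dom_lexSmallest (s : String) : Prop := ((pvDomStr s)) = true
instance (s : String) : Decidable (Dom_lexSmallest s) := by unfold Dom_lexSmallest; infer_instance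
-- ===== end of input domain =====

-- B keeps candidates as descriptors (kind, pivot) and compares them by a first-difference
-- test over boundary-aligned segments of s and reversed s, materializing only the winner.

-- ===== PORT A =====
-- Python min(a, b): the first argument unless the second is strictly smaller.
def pymin2 (a b : List Char) : List Char := if b < a then b else a

def lexSmallest (s : String) : String :=
  let cs := s.toList
  let n : Int := cs.length
  let ans := pymin2 cs ((PySem.List.slice? cs none none (-1)).getD [])
  let ans := (PySem.List.pyRange 2 n 1).foldl (fun ans i =>
    let front := (PySem.List.slice? (PySem.List.slice cs none (some i)) none none (-1)).getD []
                  ++ PySem.List.slice cs (some i) none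
    let ans := pymin2 ans front
    let back := PySem.List.slice cs none (some (n - i))
                  ++ (PySem.List.slice? (PySem.List.slice cs (some (n - i)) none) none none (-1)).getD []
    pymin2 ans back) ans
  String.ofList ans

-- ===== PORT B =====
-- Source B's seg(c, lo, hi): the characters [lo:hi) of the virtual candidate c = (kind, k),
-- a contiguous slice of s or of r (the segment never crosses the pivot k).
def segB (cs r : List Char) (kind : Nat) (k lo hi : Int) : List Char :=
  if kind = 0 then
    if hi ≤ k then
      PySem.List.slice r (some ((cs.length : Int) - k + lo)) (some ((cs.length : Int) - k + hi))
    else PySem.List.slice cs (some lo) (some hi)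
  else
    if hi ≤ k then PySem.List.slice cs (some lo) (some hi)
    else PySem.List.slice r (some (lo - k)) (some (hi - k))

-- Source B's less(a, b): first-difference comparison over the segment list (early return).
def lessSegAux (f g : Int → Int → List Char) : List (Int × Int) → Bool
  | [] => false
  | (lo, hi) :: rest =>
    let x := f lo hi
    let y := g lo hi
    if x ≠ y then decide (x < y) else lessSegAux f g rest

-- Source B's less(a, b); the closed-over s, r, n become the parameters cs, r, n.
def lessB (cs r : List Char) (n : Int) (a b : Nat × Int) : Bool :=
  let m := min a.2 b.2
  let M := max a.2 b.2
  lessSegAux (segB cs r a.1 a.2) (segB cs r b.1 b.2) [(0, m), (m, M), (M, n)]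

def lexSmallest_alt (s : String) : String :=
  let cs := s.toList
  let n : Int := cs.length
  if n = 0 then s else
  let r := (PySem.List.slice? cs none none (-1)).getD []
  let best : Nat × Int := (0, 1)
  let best := (PySem.List.pyRange 2 (n + 1) 1).foldl
    (fun best k => if lessB cs r n (0, k) best then (0, k) else best) best
  let best := (PySem.List.pyRange 1 n 1).foldl
    (fun best j => if lessB cs r n (1, j) best then (1, j) else best) best
  String.ofList (segB cs r best.1 best.2 0 best.2 ++ segB cs r best.1 best.2 best.2 n)

-- ===== PRECONDITION & SPEC =====
def Spec_lexSmallest (s : String) (out : String) : Prop := out = lexSmallest_alt s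
instance (s : String) (out : String) : Decidable (Spec_lexSmallest s out) := by unfold Spec_lexSmallest; infer_instance

-- ===== CLAIM (what is proved, stated in full; the proofs are below) =====
def Claim_equal_lexSmallest : Prop := ∀ (s : String), Dom_lexSmallest s → Spec_lexSmallest s (lexSmallest s)

-- ===== LEMMAS AND PROOFS =====

-- reverse the prefix of length k / the suffix starting at position k
def Fcand (cs : List Char) (k : Nat) : List Char := (cs.take k).reverse ++ cs.drop k
def Gcand (cs : List Char) (k : Nat) : List Char := cs.take k ++ (cs.drop k).reverse
-- A's candidate list (beyond its seed min(s, reversed(s)))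
def LA (cs : List Char) : List (List Char) :=
  (PySem.List.pyRange 2 (cs.length : Int) 1).flatMap
    (fun i => [Fcand cs i.toNat, Gcand cs ((cs.length : Int) - i).toNat])
-- character p of the virtual candidate (kind, k): the proof-side pointwise view of segB
def chB (cs : List Char) (kind : Nat) (k : Int) (p : Int) : Char :=
  if kind = 0 then
    if p < k then PySem.List.pyGetD cs (k - 1 - p) ' ' else PySem.List.pyGetD cs p ' '
  else
    if p < k then PySem.List.pyGetD cs p ' '
    else PySem.List.pyGetD cs ((cs.length : Int) - 1 - p + k) ' '

-- materialization of B's virtual candidate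
def matB (cs : List Char) (c : Nat × Int) : List Char :=
  (PySem.List.pyRange 0 (cs.length : Int) 1).map (chB cs c.1 c.2)

theorem pymin2_eq_min (a b : List Char) : pymin2 a b = min a b := by
  unfold pymin2
  rcases le_or_gt a b with h | h
  · rw [if_neg (not_lt.mpr h), min_eq_left h]
  · rw [if_pos h, min_eq_right h.le]

theorem foldl_min_mono {α : Type} [LinearOrder α] (a a' : α) (l l' : List α)
    (h : ∀ x ∈ a' :: l', ∃ y ∈ a :: l, y ≤ x) :
    l.foldl min a ≤ l'.foldl min a' := by
  have hx : l'.foldl min a' ∈ a' :: l' := by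
    rcases PySem.List.foldl_min_mem l' a' with h1 | h1
    · rw [h1]; exact List.mem_cons_self
    · exact List.mem_cons_of_mem _ h1
  obtain ⟨y, hy, hle⟩ := h _ hx
  have hmin := PySem.List.foldl_min_le l a
  rcases List.mem_cons.mp hy with rfl | hy
  · exact le_trans hmin.1 hle
  · exact le_trans (hmin.2 y hy) hle

theorem foldl_pymin2_pair (f g : Int → List Char) (l : List Int) (a : List Char) :
    l.foldl (fun ans i => pymin2 (pymin2 ans (f i)) (g i)) a
      = (l.flatMap fun i => [f i, g i]).foldl min a := by
  induction l generalizing a with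
  | nil => rfl
  | cons i t ih =>
    rw [List.foldl_cons, ih]
    simp [pymin2_eq_min]

theorem Fcand_len (cs : List Char) : Fcand cs cs.length = cs.reverse := by simp [Fcand]
theorem Fcand_one (cs : List Char) (h : 0 < cs.length) : Fcand cs 1 = cs := by
  cases cs with
  | nil => simp at h
  | cons a t => simp [Fcand]

theorem Gcand_pred (cs : List Char) (h : 0 < cs.length) : Gcand cs (cs.length - 1) = cs := by
  have h1 : (cs.drop (cs.length - 1)).length = 1 := by simp; omega
  obtain ⟨a, ha⟩ := List.length_eq_one_iff.mp h1
  unfold Gcand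
  rw [ha, List.reverse_singleton, ← ha, List.take_append_drop]

theorem A_norm (s : String) :
    lexSmallest s
      = String.ofList ((LA s.toList).foldl min (min s.toList s.toList.reverse)) := by
  unfold lexSmallest
  simp only [PySem.List.slice?_none_none_neg_one, Option.getD_some]
  rw [PySem.List.foldl_congr_mem _ _
      (fun acc i => pymin2 (pymin2 acc (Fcand s.toList i.toNat))
        (Gcand s.toList ((s.toList.length : Int) - i).toNat)) _ ?_]
  · rw [foldl_pymin2_pair, pymin2_eq_min]
    rfl
  · intro acc i hi
    obtain ⟨h2, hn⟩ := PySem.List.mem_pyRange_one.mp hi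
    simp only [PySem.List.slice_to _ (by omega : (0:Int) ≤ i),
      PySem.List.slice_from _ (by omega : (0:Int) ≤ i),
      PySem.List.slice_to _ (by omega : (0:Int) ≤ (s.toList.length : Int) - i),
      PySem.List.slice_from _ (by omega : (0:Int) ≤ (s.toList.length : Int) - i)]
    rfl

-- lexicographic < across aligned concatenations
theorem append_lt_append_iff_aligned (u v w z : List Char) (h : u.length = v.length) :
    u ++ w < v ++ z ↔ u < v ∨ (u = v ∧ w < z) := by
  induction u generalizing v with
  | nil =>
    have hv : v = [] := List.eq_nil_of_length_eq_zero h.symm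
    subst hv
    simp
  | cons a u ih =>
    cases v with
    | nil => simp at h
    | cons b v =>
      simp only [List.cons_append, List.cons_lt_cons_iff, ih v (by simpa using h),
        List.cons_eq_cons]
      tauto

-- each segment of a virtual candidate is the pointwise image of its index range
theorem seg_eq_map (cs : List Char) (kind : Nat) (k lo hi : Int)
    (hk0 : 0 ≤ k) (hkn : k ≤ (cs.length : Int)) (h0 : 0 ≤ lo) (h1 : lo ≤ hi)
    (h2 : hi ≤ (cs.length : Int)) (side : hi ≤ k ∨ k ≤ lo) :
    segB cs cs.reverse kind k lo hi = (PySem.List.pyRange lo hi 1).map (chB cs kind k) := by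
  have hmapc : ∀ (e : Int → Int), (∀ p, lo ≤ p → p < hi → chB cs kind k p
        = PySem.List.pyGetD cs (e p) ' ') →
      (PySem.List.pyRange lo hi 1).map (chB cs kind k)
        = (PySem.List.pyRange lo hi 1).map (fun p => PySem.List.pyGetD cs (e p) ' ') := by
    intro e he
    apply List.map_congr_left
    intro p hp
    obtain ⟨hp1, hp2⟩ := PySem.List.mem_pyRange_one.mp hp
    exact he p hp1 hp2
  unfold segB
  rcases side with hside | hside
  · -- segment left of the pivot
    by_cases hk : kind = 0
    · rw [if_pos hk, if_pos hside,
        hmapc (fun p => k - 1 - p) (fun p hp1 hp2 => by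
          unfold chB
          rw [if_pos hk, if_pos (by omega)])]
      rw [PySem.List.slice_toNat _ (by omega) (by omega)]
      apply List.ext_getElem
      · simp [PySem.List.length_pyRange_one]
        omega
      · intro i hL hR
        rw [List.getElem_take, List.getElem_drop, List.getElem_reverse,
          List.getElem_map, PySem.List.getElem_pyRange_one,
          PySem.List.pyGetD_eq_getElem _ _ (by
            simp [PySem.List.length_pyRange_one] at hR
            omega) (by
            simp [PySem.List.length_pyRange_one] at hR
            omega)]
        congr 1
        simp [PySem.List.length_pyRange_one] at hL hR ⊢
        omega
    · rw [if_neg hk, if_pos hside,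
        hmapc (fun p => p) (fun p hp1 hp2 => by
          unfold chB
          rw [if_neg hk, if_pos (by omega)])]
      rw [PySem.List.slice_toNat _ (by omega) (by omega)]
      apply List.ext_getElem
      · simp [PySem.List.length_pyRange_one]
        omega
      · intro i hL hR
        rw [List.getElem_take, List.getElem_drop,
          List.getElem_map, PySem.List.getElem_pyRange_one,
          PySem.List.pyGetD_eq_getElem _ _ (by
            simp [PySem.List.length_pyRange_one] at hR
            omega) (by
            simp [PySem.List.length_pyRange_one] at hR
            omega)]
        congr 1
        simp [PySem.List.length_pyRange_one] at hL hR ⊢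
        omega
  · -- segment right of the pivot
    have hnle : ¬ hi ≤ k ∨ hi = k := by omega
    by_cases hhi : hi ≤ k
    · -- degenerate: lo = hi = k, both sides empty
      have : lo = hi := by omega
      subst this
      rw [PySem.List.pyRange_one_eq_nil le_rfl, List.map_nil]
      by_cases hk : kind = 0 <;>
        simp [hk, PySem.List.slice_toNat _ (by omega : (0:Int) ≤ (cs.length : Int) - k + lo)
            (by omega : (0:Int) ≤ (cs.length : Int) - k + lo),
          PySem.List.slice_toNat _ (by omega : (0:Int) ≤ lo) (by omega : (0:Int) ≤ lo),
          PySem.List.slice_toNat _ (by omega : (0:Int) ≤ lo - k) (by omega : (0:Int) ≤ lo - k)]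
    · by_cases hk : kind = 0
      · rw [if_pos hk, if_neg hhi,
          hmapc (fun p => p) (fun p hp1 hp2 => by
            unfold chB
            rw [if_pos hk, if_neg (by omega)])]
        rw [PySem.List.slice_toNat _ (by omega) (by omega)]
        apply List.ext_getElem
        · simp [PySem.List.length_pyRange_one]
          omega
        · intro i hL hR
          rw [List.getElem_take, List.getElem_drop,
            List.getElem_map, PySem.List.getElem_pyRange_one,
            PySem.List.pyGetD_eq_getElem _ _ (by
              simp [PySem.List.length_pyRange_one] at hR
              omega) (by
              simp [PySem.List.length_pyRange_one] at hR
              omega)]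
          congr 1
          simp [PySem.List.length_pyRange_one] at hL hR ⊢
          omega
      · rw [if_neg hk, if_neg hhi,
          hmapc (fun p => (cs.length : Int) - 1 - p + k) (fun p hp1 hp2 => by
            unfold chB
            rw [if_neg hk, if_neg (by omega)])]
        rw [PySem.List.slice_toNat _ (by omega) (by omega)]
        apply List.ext_getElem
        · simp [PySem.List.length_pyRange_one]
          omega
        · intro i hL hR
          rw [List.getElem_take, List.getElem_drop, List.getElem_reverse,
            List.getElem_map, PySem.List.getElem_pyRange_one,
            PySem.List.pyGetD_eq_getElem _ _ (by
              simp [PySem.List.length_pyRange_one] at hR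
              omega) (by
              simp [PySem.List.length_pyRange_one] at hR
              omega)]
          congr 1
          simp [PySem.List.length_pyRange_one] at hL hR ⊢
          omega

-- the three-segment first-difference test decides lexicographic < of the concatenations
theorem lt3_decide (u1 u2 u3 v1 v2 v3 : List Char) (h1 : u1.length = v1.length)
    (h2 : u2.length = v2.length) :
    (if u1 ≠ v1 then decide (u1 < v1)
     else if u2 ≠ v2 then decide (u2 < v2)
     else if u3 ≠ v3 then decide (u3 < v3) else false)
    = decide (u1 ++ u2 ++ u3 < v1 ++ v2 ++ v3) := by
  have heq : ∀ (x y z w : List Char), x.length = y.length → (x ++ z = y ++ w ↔ x = y ∧ z = w) :=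
    fun x y z w h => ⟨fun e => List.append_inj e h, fun e => by rw [e.1, e.2]⟩
  have hiff : u1 ++ (u2 ++ u3) < v1 ++ (v2 ++ v3)
      ↔ (u1 < v1 ∨ (u1 = v1 ∧ u2 < v2)) ∨ ((u1 = v1 ∧ u2 = v2) ∧ u3 < v3) := by
    rw [← List.append_assoc, ← List.append_assoc,
      append_lt_append_iff_aligned _ _ _ _ (by simp [h1, h2]),
      append_lt_append_iff_aligned _ _ _ _ h1, heq _ _ _ _ h1]
  by_cases e1 : u1 = v1
  · by_cases e2 : u2 = v2
    · by_cases e3 : u3 = v3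
      · subst e1; subst e2; subst e3; simp
      · subst e1; subst e2; simp [hiff, e3]
    · subst e1; simp [hiff, e2]
  · simp [hiff, e1]

theorem lessSegAux_three (f g : Int → Int → List Char) (a b c : Int × Int)
    (h1 : (f a.1 a.2).length = (g a.1 a.2).length)
    (h2 : (f b.1 b.2).length = (g b.1 b.2).length) :
    lessSegAux f g [a, b, c]
      = decide ((f a.1 a.2 ++ f b.1 b.2 ++ f c.1 c.2)
          < (g a.1 a.2 ++ g b.1 b.2 ++ g c.1 c.2)) := by
  obtain ⟨a1, a2⟩ := a
  obtain ⟨b1, b2⟩ := b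
  obtain ⟨c1, c2⟩ := c
  simp only [lessSegAux]
  exact lt3_decide _ _ _ _ _ _ h1 h2

-- the port's comparison equals < on the materializations, for in-range pivots
theorem lessB_eq (cs : List Char) (a b : Nat × Int)
    (ha0 : 0 ≤ a.2) (han : a.2 ≤ (cs.length : Int))
    (hb0 : 0 ≤ b.2) (hbn : b.2 ≤ (cs.length : Int)) :
    lessB cs cs.reverse (cs.length : Int) a b = decide (matB cs a < matB cs b) := by
  unfold lessB
  have hm0 : (0 : Int) ≤ min a.2 b.2 := le_min ha0 hb0
  have hmM : min a.2 b.2 ≤ max a.2 b.2 := min_le_max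
  have hMn : max a.2 b.2 ≤ (cs.length : Int) := max_le han hbn
  have sidea : max a.2 b.2 ≤ a.2 ∨ a.2 ≤ min a.2 b.2 := by
    rcases le_total a.2 b.2 with h | h
    · exact Or.inr (le_min le_rfl h)
    · exact Or.inl (max_le le_rfl h)
  have sideb : max a.2 b.2 ≤ b.2 ∨ b.2 ≤ min a.2 b.2 := by
    rcases le_total b.2 a.2 with h | h
    · exact Or.inr (le_min h le_rfl)
    · exact Or.inl (max_le h le_rfl)
  have e1 : segB cs cs.reverse a.1 a.2 0 (min a.2 b.2)
      = (PySem.List.pyRange 0 (min a.2 b.2) 1).map (chB cs a.1 a.2) :=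
    seg_eq_map cs a.1 a.2 0 (min a.2 b.2) ha0 han le_rfl hm0 (le_trans hmM hMn)
      (Or.inl (min_le_left _ _))
  have e2 : segB cs cs.reverse a.1 a.2 (min a.2 b.2) (max a.2 b.2)
      = (PySem.List.pyRange (min a.2 b.2) (max a.2 b.2) 1).map (chB cs a.1 a.2) :=
    seg_eq_map cs a.1 a.2 (min a.2 b.2) (max a.2 b.2) ha0 han hm0 hmM hMn sidea
  have e3 : segB cs cs.reverse a.1 a.2 (max a.2 b.2) (cs.length : Int)
      = (PySem.List.pyRange (max a.2 b.2) (cs.length : Int) 1).map (chB cs a.1 a.2) :=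
    seg_eq_map cs a.1 a.2 (max a.2 b.2) (cs.length : Int) ha0 han (le_trans hm0 hmM) hMn
      le_rfl (Or.inr (le_max_left _ _))
  have f1 : segB cs cs.reverse b.1 b.2 0 (min a.2 b.2)
      = (PySem.List.pyRange 0 (min a.2 b.2) 1).map (chB cs b.1 b.2) :=
    seg_eq_map cs b.1 b.2 0 (min a.2 b.2) hb0 hbn le_rfl hm0 (le_trans hmM hMn)
      (Or.inl (min_le_right _ _))
  have f2 : segB cs cs.reverse b.1 b.2 (min a.2 b.2) (max a.2 b.2)
      = (PySem.List.pyRange (min a.2 b.2) (max a.2 b.2) 1).map (chB cs b.1 b.2) :=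
    seg_eq_map cs b.1 b.2 (min a.2 b.2) (max a.2 b.2) hb0 hbn hm0 hmM hMn sideb
  have f3 : segB cs cs.reverse b.1 b.2 (max a.2 b.2) (cs.length : Int)
      = (PySem.List.pyRange (max a.2 b.2) (cs.length : Int) 1).map (chB cs b.1 b.2) :=
    seg_eq_map cs b.1 b.2 (max a.2 b.2) (cs.length : Int) hb0 hbn (le_trans hm0 hmM) hMn
      le_rfl (Or.inr (le_max_right _ _))
  have hsplit : ∀ (kd : Nat) (k : Int),
      (PySem.List.pyRange 0 (min a.2 b.2) 1).map (chB cs kd k)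
        ++ (PySem.List.pyRange (min a.2 b.2) (max a.2 b.2) 1).map (chB cs kd k)
        ++ (PySem.List.pyRange (max a.2 b.2) (cs.length : Int) 1).map (chB cs kd k)
      = (PySem.List.pyRange 0 (cs.length : Int) 1).map (chB cs kd k) := by
    intro kd k
    rw [← List.map_append, ← List.map_append,
      ← PySem.List.pyRange_one_append 0 (min a.2 b.2) (max a.2 b.2) hm0 hmM,
      ← PySem.List.pyRange_one_append 0 (max a.2 b.2) (cs.length : Int)
        (le_trans hm0 hmM) hMn]
  rw [lessSegAux_three _ _ _ _ _
      (by
        show (segB cs cs.reverse a.1 a.2 0 (min a.2 b.2)).length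
          = (segB cs cs.reverse b.1 b.2 0 (min a.2 b.2)).length
        rw [e1, f1]
        simp)
      (by
        show (segB cs cs.reverse a.1 a.2 (min a.2 b.2) (max a.2 b.2)).length
          = (segB cs cs.reverse b.1 b.2 (min a.2 b.2) (max a.2 b.2)).length
        rw [e2, f2]
        simp)]
  have ga : segB cs cs.reverse a.1 a.2 0 (min a.2 b.2)
      ++ segB cs cs.reverse a.1 a.2 (min a.2 b.2) (max a.2 b.2)
      ++ segB cs cs.reverse a.1 a.2 (max a.2 b.2) (cs.length : Int) = matB cs a := by
    rw [e1, e2, e3, hsplit]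
    rfl
  have gb : segB cs cs.reverse b.1 b.2 0 (min a.2 b.2)
      ++ segB cs cs.reverse b.1 b.2 (min a.2 b.2) (max a.2 b.2)
      ++ segB cs cs.reverse b.1 b.2 (max a.2 b.2) (cs.length : Int) = matB cs b := by
    rw [f1, f2, f3, hsplit]
    rfl
  rw [decide_eq_decide]
  exact iff_of_eq (congrArg₂ (fun x y : List Char => x < y) ga gb)

-- one tournament round keeps the pointwise minimum
def foldStep (cs : List Char) (g : Int → Nat × Int) : Nat × Int → Int → Nat × Int :=
  fun b k => if lessB cs cs.reverse (cs.length : Int) (g k) b then g k else b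

theorem matB_step (cs : List Char) (g : Int → Nat × Int) (b : Nat × Int) (k : Int)
    (hc0 : 0 ≤ (g k).2) (hcn : (g k).2 ≤ (cs.length : Int))
    (hb0 : 0 ≤ b.2) (hbn : b.2 ≤ (cs.length : Int)) :
    matB cs (foldStep cs g b k) = min (matB cs b) (matB cs (g k)) := by
  unfold foldStep
  rw [lessB_eq cs (g k) b hc0 hcn hb0 hbn]
  by_cases h : matB cs (g k) < matB cs b
  · rw [if_pos (by simpa using h), min_eq_right h.le]
  · rw [if_neg (by simpa using h), min_eq_left (not_lt.mp h)]

theorem matB_fold (cs : List Char) (g : Int → Nat × Int) (l : List Int) (b0 : Nat × Int)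
    (hb0 : 0 ≤ b0.2 ∧ b0.2 ≤ (cs.length : Int))
    (hg : ∀ k ∈ l, 0 ≤ (g k).2 ∧ (g k).2 ≤ (cs.length : Int)) :
    matB cs (l.foldl (foldStep cs g) b0)
        = (l.map (fun k => matB cs (g k))).foldl min (matB cs b0)
      ∧ 0 ≤ (l.foldl (foldStep cs g) b0).2
      ∧ (l.foldl (foldStep cs g) b0).2 ≤ (cs.length : Int) := by
  induction l generalizing b0 with
  | nil => exact ⟨rfl, hb0.1, hb0.2⟩
  | cons k t ih =>
    have hgk := hg k List.mem_cons_self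
    have hb1 : 0 ≤ (foldStep cs g b0 k).2 ∧ (foldStep cs g b0 k).2 ≤ (cs.length : Int) := by
      unfold foldStep
      split
      · exact hgk
      · exact hb0
    obtain ⟨ih1, ih2, ih3⟩ := ih (foldStep cs g b0 k) hb1
      (fun x hx => hg x (List.mem_cons_of_mem _ hx))
    refine ⟨?_, ih2, ih3⟩
    rw [List.foldl_cons, ih1, List.map_cons, List.foldl_cons,
      matB_step cs g b0 k hgk.1 hgk.2 hb0.1 hb0.2]

theorem matB_F (cs : List Char) (k : Int) (h1 : 1 ≤ k) (h2 : k ≤ (cs.length : Int)) :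
    matB cs (0, k) = Fcand cs k.toNat := by
  unfold matB
  apply List.ext_getElem
  · simp [PySem.List.length_pyRange_one, Fcand]
    omega
  · intro p hp hq
    have hpn : p < cs.length := by
      simpa [PySem.List.length_pyRange_one] using hp
    rw [List.getElem_map, PySem.List.getElem_pyRange_one]
    unfold Fcand chB
    simp only [if_true, zero_add]
    rw [List.getElem_append]
    by_cases hpk : (p : Int) < k
    · have hplt : p < (cs.take k.toNat).reverse.length := by simp; omega
      rw [dif_pos hplt, if_pos hpk,
        PySem.List.pyGetD_eq_getElem _ _ (by omega) (by omega)]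
      rw [List.getElem_reverse, List.getElem_take]
      congr 1
      simp
      omega
    · have hpge : ¬ p < (cs.take k.toNat).reverse.length := by simp; omega
      rw [dif_neg hpge, if_neg hpk,
        PySem.List.pyGetD_eq_getElem _ _ (by omega) (by omega)]
      rw [List.getElem_drop]
      congr 1
      simp
      omega

theorem matB_G (cs : List Char) (k : Int) (h1 : 0 ≤ k) (h2 : k ≤ (cs.length : Int)) :
    matB cs (1, k) = Gcand cs k.toNat := by
  unfold matB
  apply List.ext_getElem
  · simp [PySem.List.length_pyRange_one, Gcand]
    omega
  · intro p hp hq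
    have hpn : p < cs.length := by
      simpa [PySem.List.length_pyRange_one] using hp
    rw [List.getElem_map, PySem.List.getElem_pyRange_one]
    unfold Gcand chB
    simp only [if_neg (by decide : ¬ (1 : Nat) = 0), zero_add]
    rw [List.getElem_append]
    by_cases hpk : (p : Int) < k
    · have hplt : p < (cs.take k.toNat).length := by simp; omega
      rw [dif_pos hplt, if_pos hpk,
        PySem.List.pyGetD_eq_getElem _ _ (by omega) (by omega)]
      rw [List.getElem_take]
      simp
    · have hpge : ¬ p < (cs.take k.toNat).length := by simp; omega
      rw [dif_neg hpge, if_neg hpk,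
        PySem.List.pyGetD_eq_getElem _ _ (by omega) (by omega)]
      rw [List.getElem_reverse, List.getElem_drop]
      congr 1
      simp
      omega

-- the two tournament rounds of B, named for the proof
def Bbest1 (cs : List Char) : Nat × Int :=
  (PySem.List.pyRange 2 ((cs.length : Int) + 1) 1).foldl
    (foldStep cs (fun k => (0, k))) (0, 1)
def Bbest2 (cs : List Char) : Nat × Int :=
  (PySem.List.pyRange 1 (cs.length : Int) 1).foldl
    (foldStep cs (fun j => (1, j))) (Bbest1 cs)

theorem B_norm (s : String) (hne : s.toList ≠ []) :
    lexSmallest_alt s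
      = String.ofList
          (((PySem.List.pyRange 2 ((s.toList.length : Int) + 1) 1).map
              (fun k => Fcand s.toList k.toNat)
            ++ (PySem.List.pyRange 1 (s.toList.length : Int) 1).map
              (fun j => Gcand s.toList j.toNat)).foldl min (Fcand s.toList 1)) := by
  have hlen : 0 < s.toList.length := List.length_pos_of_ne_nil hne
  unfold lexSmallest_alt
  rw [if_neg (by simpa using hne)]
  simp only [PySem.List.slice?_none_none_neg_one, Option.getD_some]
  show String.ofList
      (segB s.toList s.toList.reverse (Bbest2 s.toList).1 (Bbest2 s.toList).2
          0 (Bbest2 s.toList).2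
        ++ segB s.toList s.toList.reverse (Bbest2 s.toList).1 (Bbest2 s.toList).2
          (Bbest2 s.toList).2 (s.toList.length : Int)) = _
  obtain ⟨e1, b1a, b1b⟩ := matB_fold s.toList (fun k => ((0 : Nat), k))
    (PySem.List.pyRange 2 ((s.toList.length : Int) + 1) 1) ((0 : Nat), (1 : Int))
    ⟨by norm_num, by
      show (1 : Int) ≤ (s.toList.length : Int)
      exact_mod_cast hlen⟩
    (fun k hk => by
      obtain ⟨h1, h2⟩ := PySem.List.mem_pyRange_one.mp hk
      exact ⟨by show (0 : Int) ≤ k; omega, by show k ≤ (s.toList.length : Int); omega⟩)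
  obtain ⟨e2, b2a, b2b⟩ := matB_fold s.toList (fun j => ((1 : Nat), j))
    (PySem.List.pyRange 1 (s.toList.length : Int) 1) (Bbest1 s.toList)
    ⟨b1a, b1b⟩
    (fun j hj => by
      obtain ⟨h1, h2⟩ := PySem.List.mem_pyRange_one.mp hj
      exact ⟨by show (0 : Int) ≤ j; omega, by show j ≤ (s.toList.length : Int); omega⟩)
  have hb2a : 0 ≤ (Bbest2 s.toList).2 := b2a
  have hb2b : (Bbest2 s.toList).2 ≤ (s.toList.length : Int) := b2b
  have hmat : segB s.toList s.toList.reverse (Bbest2 s.toList).1 (Bbest2 s.toList).2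
        0 (Bbest2 s.toList).2
      ++ segB s.toList s.toList.reverse (Bbest2 s.toList).1 (Bbest2 s.toList).2
        (Bbest2 s.toList).2 (s.toList.length : Int)
      = matB s.toList (Bbest2 s.toList) := by
    rw [seg_eq_map s.toList _ _ 0 (Bbest2 s.toList).2 hb2a hb2b le_rfl hb2a hb2b
        (Or.inl le_rfl),
      seg_eq_map s.toList _ _ (Bbest2 s.toList).2 (s.toList.length : Int) hb2a hb2b hb2a
        (by omega) le_rfl (Or.inr le_rfl),
      ← List.map_append,
      ← PySem.List.pyRange_one_append 0 (Bbest2 s.toList).2 (s.toList.length : Int)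
        hb2a hb2b]
    rfl
  rw [hmat, show matB s.toList (Bbest2 s.toList)
      = ((PySem.List.pyRange 1 (s.toList.length : Int) 1).map
          (fun j => matB s.toList ((1 : Nat), j))).foldl min (matB s.toList (Bbest1 s.toList))
    from e2,
    show matB s.toList (Bbest1 s.toList)
      = ((PySem.List.pyRange 2 ((s.toList.length : Int) + 1) 1).map
          (fun k => matB s.toList ((0 : Nat), k))).foldl min (matB s.toList ((0 : Nat), (1 : Int)))
    from e1,
    List.foldl_append.symm]
  have hinit : matB s.toList ((0 : Nat), (1 : Int)) = Fcand s.toList 1 := by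
    rw [matB_F s.toList 1 le_rfl (by exact_mod_cast hlen)]
    rfl
  have hFs : (PySem.List.pyRange 2 ((s.toList.length : Int) + 1) 1).map
        (fun k => matB s.toList ((0 : Nat), k))
      = (PySem.List.pyRange 2 ((s.toList.length : Int) + 1) 1).map
        (fun k => Fcand s.toList k.toNat) := by
    apply List.map_congr_left
    intro k hk
    obtain ⟨hk1, hk2⟩ := PySem.List.mem_pyRange_one.mp hk
    exact matB_F s.toList k (by omega) (by omega)
  have hGs : (PySem.List.pyRange 1 (s.toList.length : Int) 1).map
        (fun j => matB s.toList ((1 : Nat), j))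
      = (PySem.List.pyRange 1 (s.toList.length : Int) 1).map
        (fun j => Gcand s.toList j.toNat) := by
    apply List.map_congr_left
    intro j hj
    obtain ⟨hj1, hj2⟩ := PySem.List.mem_pyRange_one.mp hj
    exact matB_G s.toList j (by omega) (by omega)
  rw [hinit, hFs, hGs]

-- both folds compute the minimum of the same candidate set
theorem main_list (cs : List Char) (hne : cs ≠ []) :
    (LA cs).foldl min (min cs cs.reverse)
      = ((PySem.List.pyRange 2 ((cs.length : Int) + 1) 1).map (fun k => Fcand cs k.toNat)
          ++ (PySem.List.pyRange 1 (cs.length : Int) 1).map (fun j => Gcand cs j.toNat)).foldl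
            min (Fcand cs 1) := by
  have hlen : 0 < cs.length := List.length_pos_of_ne_nil hne
  apply le_antisymm
  · -- every B candidate is ≥ something on A's side
    apply foldl_min_mono
    intro x hx
    rcases List.mem_cons.mp hx with rfl | hx
    · exact ⟨min cs cs.reverse, List.mem_cons_self,
        by rw [Fcand_one cs hlen]; exact min_le_left _ _⟩
    rcases List.mem_append.mp hx with hx | hx
    · obtain ⟨k, hk, rfl⟩ := List.mem_map.mp hx
      obtain ⟨hk1, hk2⟩ := PySem.List.mem_pyRange_one.mp hk
      by_cases hkn : k.toNat = cs.length
      · exact ⟨min cs cs.reverse, List.mem_cons_self,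
          by rw [hkn, Fcand_len]; exact min_le_right _ _⟩
      · refine ⟨Fcand cs k.toNat, List.mem_cons_of_mem _ ?_, le_refl _⟩
        unfold LA
        exact List.mem_flatMap.mpr ⟨k,
          PySem.List.mem_pyRange_one.mpr ⟨by omega, by omega⟩, List.mem_cons_self⟩
    · obtain ⟨j, hj, rfl⟩ := List.mem_map.mp hx
      obtain ⟨hj1, hj2⟩ := PySem.List.mem_pyRange_one.mp hj
      by_cases hjn : j.toNat = cs.length - 1
      · exact ⟨min cs cs.reverse, List.mem_cons_self,
          by rw [hjn, Gcand_pred cs hlen]; exact min_le_left _ _⟩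
      · refine ⟨Gcand cs j.toNat, List.mem_cons_of_mem _ ?_, le_refl _⟩
        unfold LA
        refine List.mem_flatMap.mpr ⟨(cs.length : Int) - j,
          PySem.List.mem_pyRange_one.mpr ⟨by omega, by omega⟩, ?_⟩
        have h3 : ((cs.length : Int) - ((cs.length : Int) - j)).toNat = j.toNat := by omega
        rw [h3]
        exact List.mem_cons_of_mem _ List.mem_cons_self
  · -- every A candidate is ≥ something on B's side
    apply foldl_min_mono
    intro x hx
    rcases List.mem_cons.mp hx with rfl | hx
    · rcases min_choice cs cs.reverse with hm | hm <;> rw [hm]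
      · exact ⟨Fcand cs 1, List.mem_cons_self, le_of_eq (Fcand_one cs hlen)⟩
      · by_cases h1 : cs.length = 1
        · obtain ⟨a, ha⟩ := List.length_eq_one_iff.mp h1
          refine ⟨Fcand cs 1, List.mem_cons_self, ?_⟩
          rw [Fcand_one cs hlen, ha]
          simp
        · refine ⟨Fcand cs cs.length, List.mem_cons_of_mem _ (List.mem_append.mpr (Or.inl ?_)),
            le_of_eq (Fcand_len cs)⟩
          exact List.mem_map.mpr ⟨(cs.length : Int),
            PySem.List.mem_pyRange_one.mpr ⟨by omega, by omega⟩, by simp⟩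
    · unfold LA at hx
      obtain ⟨i, hi, hin⟩ := List.mem_flatMap.mp hx
      obtain ⟨hi1, hi2⟩ := PySem.List.mem_pyRange_one.mp hi
      rcases List.mem_cons.mp hin with rfl | hin2
      · refine ⟨Fcand cs i.toNat, List.mem_cons_of_mem _ (List.mem_append.mpr (Or.inl
          (List.mem_map.mpr ⟨i, PySem.List.mem_pyRange_one.mpr ⟨by omega, by omega⟩, rfl⟩))),
          le_refl _⟩
      · rcases List.mem_cons.mp hin2 with rfl | habs
        · refine ⟨Gcand cs ((cs.length : Int) - i).toNat, List.mem_cons_of_mem _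
            (List.mem_append.mpr (Or.inr (List.mem_map.mpr ⟨(cs.length : Int) - i,
              PySem.List.mem_pyRange_one.mpr ⟨by omega, by omega⟩, rfl⟩))), le_refl _⟩
        · simp at habs

-- ===== VERDICT (by name: the statement is the Claim_ definition above) =====
theorem lexSmallest_spec : Claim_equal_lexSmallest := by
  intro s _
  unfold Spec_lexSmallest
  by_cases hcs : s.toList = []
  · rw [A_norm]
    unfold lexSmallest_alt
    rw [if_pos (by simp [hcs])]
    conv_rhs => rw [← String.ofList_toList (s := s), hcs]
    rw [hcs]
    rfl
  · rw [A_norm, B_norm s hcs]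
    exact congrArg _ (main_list s.toList hcs)
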